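-- pv_equiv track=rewrite | github.com/natekali/moneybags | src/bags_sniper/services/token_discovery.py | _extract_token_metadata_from_logs
-- ===== SOURCE A (Python) =====
-- from typing import Any, Optional
--
-- def _extract_token_metadata_from_logs(
--
--     logs: list[str],
-- ) -> tuple[Optional[str], Optional[str]]:
--     """Extract token name and symbol from transaction logs."""
--     name = None
--     symbol = None
--
--     for log in logs:
--         log_lower = log.lower()
--
--         # Look for name patterns
--         if "name:" in log_lower or "token name" in log_lower:
--             parts = log.split(":")
--             if len(parts) > 1:
--                 name = parts[-1].strip().strip('"\'')[:50]  # Limit length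
--
--         # Look for symbol patterns
--         if "symbol:" in log_lower or "token symbol" in log_lower:
--             parts = log.split(":")
--             if len(parts) > 1:
--                 symbol = parts[-1].strip().strip('"\'')[:10]  # Limit length
--
--     return name, symbol
-- ===== SOURCE B (Python) =====
-- from typing import Optional
--
--
-- def _extract_token_metadata_from_logs(
--     logs: list[str],
-- ) -> tuple[Optional[str], Optional[str]]:
--     """Extract token name and symbol from transaction logs."""
--
--     def last_match(pat_a: str, pat_b: str, limit: int) -> Optional[str]:
--         for log in reversed(logs):
--             low = log.lower()
--             if (pat_a in low or pat_b in low) and ":" in log: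
--                 return log.rsplit(":", 1)[1].strip().strip('"\'')[:limit]
--         return None
--
--     return (
--         last_match("name:", "token name", 50),
--         last_match("symbol:", "token symbol", 10),
--     )
-- ===== Notes on version B (the rewrite author's own statement) =====
-- stated objective: alternative
-- what changed: B replaces A's single forward pass that keeps overwriting a (name, symbol) state with two independent reversed scans, each returning at the first (i.e. last-in-order) qualifying log, and extracts the last colon-part with rsplit instead of split()[-1].
import Mathlib
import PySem

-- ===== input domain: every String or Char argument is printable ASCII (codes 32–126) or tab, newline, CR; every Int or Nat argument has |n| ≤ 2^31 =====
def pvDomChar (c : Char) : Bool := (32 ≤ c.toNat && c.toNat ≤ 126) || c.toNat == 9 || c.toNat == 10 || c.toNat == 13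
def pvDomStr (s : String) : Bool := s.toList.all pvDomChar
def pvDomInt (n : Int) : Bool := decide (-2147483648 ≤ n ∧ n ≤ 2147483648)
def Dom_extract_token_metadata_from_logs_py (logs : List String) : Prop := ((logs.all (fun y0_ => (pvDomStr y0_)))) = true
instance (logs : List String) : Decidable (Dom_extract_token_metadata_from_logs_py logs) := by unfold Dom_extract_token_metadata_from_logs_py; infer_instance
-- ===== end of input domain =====

-- B computes name and symbol independently, each by one reversed scan that returns at the
-- first qualifying log (= the last in order), instead of A's single forward pass that keeps
-- overwriting both fields; same results by a different decomposition (objective: alternative).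

-- ===== PORT A =====
-- one iteration of A's `for log in logs` loop body over the state (name, symbol)
def pvStepA (st : Option String × Option String) (log : String) : Option String × Option String :=
  let log_lower := PySem.Str.lower log
  let st1 :=
    if PySem.Str.isIn "name:" log_lower || PySem.Str.isIn "token name" log_lower then
      match PySem.Str.split? log ":" with
      | none => st
      | some parts =>
        if parts.length > 1 then
          (some (PySem.Str.slice (PySem.Str.stripChars (PySem.Str.strip (PySem.List.pyGetD parts (-1) "")) "\"'") none (some 50)), st.2)
        else st
    else st
  if PySem.Str.isIn "symbol:" log_lower || PySem.Str.isIn "token symbol" log_lower then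
    match PySem.Str.split? log ":" with
    | none => st1
    | some parts =>
      if parts.length > 1 then
        (st1.1, some (PySem.Str.slice (PySem.Str.stripChars (PySem.Str.strip (PySem.List.pyGetD parts (-1) "")) "\"'") none (some 10)))
      else st1
  else st1

def extract_token_metadata_from_logs_py (logs : List String) : Option String × Option String :=
  logs.foldl pvStepA (none, none)

-- ===== PORT B =====
-- port of Source B's `log.rsplit(":", 1)[1]` — exact when ':' occurs in the string (the only case
-- in which B evaluates it): the characters after the last ':'
def pvAfterLastColon (log : String) : String :=
  String.ofList ((log.toList.reverse.takeWhile (fun c => c != ':')).reverse)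

-- Source B's helper `last_match`: scan an already-reversed list, return at the first qualifying log
def pvLastMatch (patA patB : String) (limit : Int) : List String → Option String
  | [] => none
  | log :: rest =>
    let low := PySem.Str.lower log
    if (PySem.Str.isIn patA low || PySem.Str.isIn patB low) && PySem.Str.isIn ":" log then
      some (PySem.Str.slice (PySem.Str.stripChars (PySem.Str.strip (pvAfterLastColon log)) "\"'") none (some limit))
    else pvLastMatch patA patB limit rest

def extract_token_metadata_from_logs_py_alt (logs : List String) : Option String × Option String :=
  (pvLastMatch "name:" "token name" 50 logs.reverse,
   pvLastMatch "symbol:" "token symbol" 10 logs.reverse)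

-- ===== PRECONDITION & SPEC =====
def Spec_extract_token_metadata_from_logs_py (logs : List String) (out : Option String × Option String) : Prop := out = extract_token_metadata_from_logs_py_alt logs
instance (logs : List String) (out : Option String × Option String) : Decidable (Spec_extract_token_metadata_from_logs_py logs out) := by unfold Spec_extract_token_metadata_from_logs_py; infer_instance

-- ===== CLAIM (what is proved, stated in full; the proofs are below) =====
def Claim_equal_extract_token_metadata_from_logs_py : Prop := ∀ (logs : List String), Dom_extract_token_metadata_from_logs_py logs → Spec_extract_token_metadata_from_logs_py logs (extract_token_metadata_from_logs_py logs)

-- ===== LEMMAS AND PROOFS =====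

def pvSplitCol (pre : List Char) : List Char → List (List Char)
  | [] => [pre]
  | c :: rest => if c = ':' then pre :: pvSplitCol [] rest else pvSplitCol (pre ++ [c]) rest

theorem pv_go_eq : ∀ (l : List Char) (fuel : Nat) (cur : List Char) (acc : List (List Char)),
    l.length ≤ fuel →
    PySem.Chars.splitOn.go [':'] fuel l cur acc = acc.reverse ++ pvSplitCol cur.reverse l := by
  intro l
  induction l with
  | nil =>
    intro fuel cur acc _
    cases fuel <;> simp [PySem.Chars.splitOn.go, pvSplitCol]
  | cons c rest ih =>
    intro fuel cur acc h
    cases fuel with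
    | zero => simp at h
    | succ f =>
      simp only [PySem.Chars.splitOn.go]
      by_cases hc : c = ':'
      · subst hc
        simp only [List.isPrefixOf, BEq.rfl, Bool.true_and, if_pos, List.length_cons,
          List.length_nil, List.drop_succ_cons, List.drop_zero]
        rw [ih f [] (cur.reverse :: acc) (by simpa using Nat.le_of_succ_le_succ h)]
        simp [pvSplitCol]
      · have hp : ([':'].isPrefixOf (c :: rest)) = false := by
          simp [List.isPrefixOf]
          exact fun h' => (hc h'.symm).elim
        rw [hp]
        simp only [Bool.false_eq_true, if_false]
        rw [ih f (c :: cur) acc (by simpa using Nat.le_of_succ_le_succ h)]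
        simp [pvSplitCol, hc]

theorem pvSplitOn_eq (cs : List Char) :
    PySem.Chars.splitOn cs [':'] = pvSplitCol [] cs := by
  have := pv_go_eq cs (cs.length + 1) [] [] (by omega)
  simpa [PySem.Chars.splitOn] using this

def pvLastPart (pre : List Char) : List Char → List Char
  | [] => pre
  | c :: rest => if c = ':' then pvLastPart [] rest else pvLastPart (pre ++ [c]) rest

theorem pvSplitCol_length (l : List Char) : ∀ pre,
    (pvSplitCol pre l).length = l.count ':' + 1 := by
  induction l with
  | nil => intro pre; simp [pvSplitCol]
  | cons c rest ih =>
    intro pre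
    by_cases hc : c = ':' <;> simp [pvSplitCol, hc, ih]

theorem pvSplitCol_getLast? (l : List Char) : ∀ pre,
    (pvSplitCol pre l).getLast? = some (pvLastPart pre l) := by
  induction l with
  | nil => intro pre; simp [pvSplitCol, pvLastPart]
  | cons c rest ih =>
    intro pre
    by_cases hc : c = ':' <;> simp [pvSplitCol, pvLastPart, hc, ih]
    · rw [List.getLast?_cons, ih]
      simp

theorem pvLastPart_no_colon (l : List Char) (h : ':' ∉ l) : ∀ pre, pvLastPart pre l = pre ++ l := by
  induction l with
  | nil => intro pre; simp [pvLastPart]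
  | cons c rest ih =>
    intro pre
    have hc : c ≠ ':' := fun e => h (e ▸ List.mem_cons_self ..)
    simp only [pvLastPart, if_neg hc]
    rw [ih (fun hm => h (List.mem_cons_of_mem _ hm))]
    simp

theorem pvTakeWhile_all {p : Char → Bool} (l : List Char) (h : ∀ x ∈ l, p x) :
    l.takeWhile p = l := List.takeWhile_eq_self_iff.mpr h

theorem pvAfterLast_cons_mem (c : Char) (rest : List Char) (h : ':' ∈ rest) :
    ((c :: rest).reverse.takeWhile (fun c => c != ':')).reverse
      = (rest.reverse.takeWhile (fun c => c != ':')).reverse := by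
  have hne : (rest.reverse.takeWhile (fun c => c != ':')).length ≠ rest.reverse.length := by
    intro he
    have heq : rest.reverse.takeWhile (fun c => c != ':') = rest.reverse :=
      (List.takeWhile_prefix _).eq_of_length he
    have := List.takeWhile_eq_self_iff.mp heq ':' (by simpa using h)
    simp at this
  simp only [List.reverse_cons]
  rw [List.takeWhile_append, if_neg hne]

theorem pvLastPart_eq_afterLast (l : List Char) (h : ':' ∈ l) : ∀ pre,
    pvLastPart pre l = (l.reverse.takeWhile (fun c => c != ':')).reverse := by
  induction l with
  | nil => simp at h
  | cons c rest ih =>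
    intro pre
    by_cases hc : c = ':'
    · subst hc
      simp only [pvLastPart]
      rw [if_pos trivial]
      by_cases hr : ':' ∈ rest
      · rw [ih hr, pvAfterLast_cons_mem _ _ hr]
      · rw [pvLastPart_no_colon rest hr []]
        simp only [List.nil_append, List.reverse_cons]
        have hall : rest.reverse.takeWhile (fun c => c != ':') = rest.reverse :=
          pvTakeWhile_all _ (fun x hx => by
            simp only [bne_iff_ne, ne_eq]
            exact fun e => hr (by simpa [e] using List.mem_reverse.mp hx))
        rw [List.takeWhile_append, if_pos (by rw [hall])]
        simp
    · have hr : ':' ∈ rest := by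
        cases List.mem_cons.mp h with
        | inl e => exact absurd e.symm hc
        | inr m => exact m
      simp only [pvLastPart]
      rw [if_neg hc]
      rw [ih hr, pvAfterLast_cons_mem _ _ hr]

theorem pv_pyGetD_concat {α : Type} (q : List α) (a : α) (d : α) :
    PySem.List.pyGetD (q ++ [a]) (-1) d = a := by
  simp [PySem.List.pyGetD, PySem.List.pyGet?, PySem.List.pyIdx?]

theorem pv_isIn_colon (log : String) :
    PySem.Str.isIn ":" log = true ↔ ':' ∈ log.toList := by
  rw [PySem.Str.isIn_eq]
  show PySem.Chars.isIn [':'] log.toList = true ↔ _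
  rw [PySem.Chars.isIn_iff_infix]
  constructor
  · intro h; exact List.singleton_sublist.mp h.sublist
  · intro h
    obtain ⟨s, t, he⟩ := List.append_of_mem h
    exact ⟨s, t, by rw [he]; simp⟩

theorem pv_split_spec (log : String) :
    ∃ ps, PySem.Str.split? log ":" = some ps ∧
      ps.map String.toList = pvSplitCol [] log.toList := by
  have h := PySem.Str.split?_map log ":"
  have h2 : PySem.Chars.split? log.toList ":".toList = some (pvSplitCol [] log.toList) := by
    rw [show (":".toList) = [':'] from rfl]
    rw [show PySem.Chars.split? log.toList [':'] = some (PySem.Chars.splitOn log.toList [':']) from rfl]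
    rw [pvSplitOn_eq]
  rw [h2] at h
  cases hs : PySem.Str.split? log ":" with
  | none => rw [hs] at h; simp at h
  | some ps => rw [hs] at h; exact ⟨ps, rfl, by simpa using h⟩

theorem pv_len_iff (log : String) (ps : List String)
    (hmap : ps.map String.toList = pvSplitCol [] log.toList) :
    (ps.length > 1) ↔ PySem.Str.isIn ":" log = true := by
  have hl : ps.length = log.toList.count ':' + 1 := by
    have := congrArg List.length hmap
    simpa [pvSplitCol_length] using this
  rw [pv_isIn_colon, hl, ← List.count_pos_iff]
  omega

theorem pv_last_eq (log : String) (ps : List String)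
    (hmap : ps.map String.toList = pvSplitCol [] log.toList)
    (hc : ':' ∈ log.toList) :
    PySem.List.pyGetD ps (-1) "" = pvAfterLastColon log := by
  have hlast : (ps.map String.toList).getLast? = some (pvLastPart [] log.toList) := by
    rw [hmap, pvSplitCol_getLast?]
  rw [List.getLast?_map] at hlast
  cases hps : ps.getLast? with
  | none => rw [hps] at hlast; simp at hlast
  | some x =>
    rw [hps] at hlast
    have hx : x.toList = pvLastPart [] log.toList := by simpa using hlast
    obtain ⟨q, rfl⟩ : ∃ q, ps = q ++ [x] := by
      rcases List.getLast?_eq_some_iff.mp hps with ⟨q, hq⟩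
      exact ⟨q, hq⟩
    rw [pv_pyGetD_concat]
    have : x.toList = (pvAfterLastColon log).toList := by
      rw [hx, pvLastPart_eq_afterLast _ hc, pvAfterLastColon, String.toList_ofList]
    calc x = String.ofList x.toList := (String.ofList_toList (s := x)).symm
      _ = pvAfterLastColon log := by rw [this, pvAfterLastColon, String.toList_ofList]

theorem pv_step_fst (st : Option String × Option String) (log : String) :
    (pvStepA st log).1 = ((pvLastMatch "name:" "token name" 50 [log]).elim st.1 some) := by
  obtain ⟨ps, hps, hmap⟩ := pv_split_spec log
  have hlen := pv_len_iff log ps hmap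
  simp only [pvStepA, pvLastMatch, hps]
  cases hn : (PySem.Str.isIn "name:" (PySem.Str.lower log) || PySem.Str.isIn "token name" (PySem.Str.lower log)) with
  | false =>
    simp only [Bool.false_eq_true, if_false, Bool.false_and, Option.elim_none]
    cases hs : (PySem.Str.isIn "symbol:" (PySem.Str.lower log) || PySem.Str.isIn "token symbol" (PySem.Str.lower log)) with
    | false => simp
    | true => simp only [if_true]; split <;> simp
  | true =>
    simp only [if_true, Bool.true_and]
    cases hc : PySem.Str.isIn ":" log with
    | false =>
      have : ¬ (ps.length > 1) := fun h => by rw [hlen] at h; rw [h] at hc; cases hc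
      simp only [Bool.false_eq_true, if_false, Option.elim_none, if_neg this]
      cases hs : (PySem.Str.isIn "symbol:" (PySem.Str.lower log) || PySem.Str.isIn "token symbol" (PySem.Str.lower log)) with
      | false => simp
      | true => simp
    | true =>
      have hgt : ps.length > 1 := hlen.mpr hc
      have hv := pv_last_eq log ps hmap ((pv_isIn_colon log).mp hc)
      simp only [if_pos hgt, if_true, Option.elim_some, hv]
      cases hs : (PySem.Str.isIn "symbol:" (PySem.Str.lower log) || PySem.Str.isIn "token symbol" (PySem.Str.lower log)) with
      | false => simp
      | true => simp

theorem pv_step_snd (st : Option String × Option String) (log : String) :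
    (pvStepA st log).2 = ((pvLastMatch "symbol:" "token symbol" 10 [log]).elim st.2 some) := by
  obtain ⟨ps, hps, hmap⟩ := pv_split_spec log
  have hlen := pv_len_iff log ps hmap
  simp only [pvStepA, pvLastMatch, hps]
  cases hs : (PySem.Str.isIn "symbol:" (PySem.Str.lower log) || PySem.Str.isIn "token symbol" (PySem.Str.lower log)) with
  | false =>
    simp only [Bool.false_eq_true, if_false, Bool.false_and, Option.elim_none]
    split <;> first | rfl | (split <;> rfl)
  | true =>
    simp only [if_true, Bool.true_and]
    cases hc : PySem.Str.isIn ":" log with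
    | false =>
      have hng : ¬ (ps.length > 1) := fun h => by rw [hlen] at h; rw [h] at hc; cases hc
      simp only [Bool.false_eq_true, if_false, Option.elim_none, if_neg hng]
      split <;> rfl
    | true =>
      have hgt : ps.length > 1 := hlen.mpr hc
      have hv := pv_last_eq log ps hmap ((pv_isIn_colon log).mp hc)
      simp only [if_pos hgt, if_true, Option.elim_some, hv]

theorem pvLastMatch_append (pa pb : String) (lim : Int) (xs ys : List String) :
    pvLastMatch pa pb lim (xs ++ ys)
      = ((pvLastMatch pa pb lim xs).elim (pvLastMatch pa pb lim ys) some) := by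
  induction xs with
  | nil => simp [pvLastMatch]
  | cons x xs ih =>
    simp only [List.cons_append, pvLastMatch]
    split
    · simp
    · exact ih

theorem pv_fold_fst (ls : List String) : ∀ st,
    (ls.foldl pvStepA st).1 = ((pvLastMatch "name:" "token name" 50 ls.reverse).elim st.1 some) := by
  induction ls with
  | nil => intro st; simp [pvLastMatch]
  | cons l ls ih =>
    intro st
    rw [List.foldl_cons, ih, List.reverse_cons, pvLastMatch_append]
    cases h : pvLastMatch "name:" "token name" 50 ls.reverse with
    | some v => simp
    | none => simp only [Option.elim_none]; exact pv_step_fst st l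

theorem pv_fold_snd (ls : List String) : ∀ st,
    (ls.foldl pvStepA st).2 = ((pvLastMatch "symbol:" "token symbol" 10 ls.reverse).elim st.2 some) := by
  induction ls with
  | nil => intro st; simp [pvLastMatch]
  | cons l ls ih =>
    intro st
    rw [List.foldl_cons, ih, List.reverse_cons, pvLastMatch_append]
    cases h : pvLastMatch "symbol:" "token symbol" 10 ls.reverse with
    | some v => simp
    | none => simp only [Option.elim_none]; exact pv_step_snd st l

-- ===== VERDICT (by name: the statement is the Claim_ definition above) =====
theorem extract_token_metadata_from_logs_py_spec : Claim_equal_extract_token_metadata_from_logs_py := by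
  intro logs _
  unfold Spec_extract_token_metadata_from_logs_py extract_token_metadata_from_logs_py extract_token_metadata_from_logs_py_alt
  have h1 := pv_fold_fst logs (none, none)
  have h2 := pv_fold_snd logs (none, none)
  cases hA : pvLastMatch "name:" "token name" 50 logs.reverse <;>
    cases hB : pvLastMatch "symbol:" "token symbol" 10 logs.reverse <;>
    simp only [hA, hB, Option.elim_none, Option.elim_some] at h1 h2 <;> exact Prod.ext h1 h2
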